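-- pv_equiv track=rewrite | github.com/ClarktheDarkShark/self-evolving_AI_agent | src/tasks/instance/knowledge_graph/task.py | _extract_variable_index_from_argument
-- ===== SOURCE A (Python) =====
-- from typing import Optional, Callable, Any, Sequence, Mapping
--
-- def _extract_variable_index_from_argument(raw_argument: str) -> Optional[int]:
--     # The original implementation of AgentBench contains bugs.
--     # The method will not check whether the variable index exists.
--     possible_lower_prefix_list = ["#", "variable#", "variable #", "var#", "var #"]
--     for prefix in possible_lower_prefix_list:
--         if raw_argument.lower().startswith(prefix):
--             variable_index_str = raw_argument[len(prefix) :]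
--             try:
--                 variable_index = int(variable_index_str)
--                 return variable_index
--             except Exception as e:
--                 raise e
--     return None
-- ===== SOURCE B (Python) =====
-- def _extract_variable_index_from_argument(raw_argument):
--     # Partition on the first '#': the part before it must be one of the
--     # allowed (lowercased) words; the part after it is the index.
--     word, sep, rest = raw_argument.partition('#')
--     if not sep:
--         return None
--     if word.lower() in ('', 'variable', 'variable ', 'var', 'var '):
--         return int(rest)
--     return None
-- ===== Notes on version B (the rewrite author's own statement) =====
-- stated objective: simpler
-- what changed: Replaces the loop that tries five lowercase prefixes with startswith against a single partition on the first '#' followed by one membership test of the lowercased leading word.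
import Mathlib
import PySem

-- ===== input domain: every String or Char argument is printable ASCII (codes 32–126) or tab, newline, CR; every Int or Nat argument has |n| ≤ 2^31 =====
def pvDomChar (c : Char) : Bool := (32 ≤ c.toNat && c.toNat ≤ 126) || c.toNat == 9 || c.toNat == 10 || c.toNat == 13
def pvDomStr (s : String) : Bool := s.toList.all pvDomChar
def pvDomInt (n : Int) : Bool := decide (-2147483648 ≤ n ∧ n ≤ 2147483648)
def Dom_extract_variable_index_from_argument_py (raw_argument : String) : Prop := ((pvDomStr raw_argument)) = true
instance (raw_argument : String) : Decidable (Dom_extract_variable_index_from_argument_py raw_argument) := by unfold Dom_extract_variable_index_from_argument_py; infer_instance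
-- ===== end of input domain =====

-- B replaces A's loop over five lowercase prefixes with a single partition on the
-- first '#' plus one membership test of the lowercased leading word (objective: simpler).

-- ===== PORT A =====
-- the five prefixes A tries, in order
def pvPrefixesA : List (List Char) :=
  ["#".toList, "variable#".toList, "variable #".toList, "var#".toList, "var #".toList]

-- the for-loop over the prefix list; int() failing raises in Python (excluded by Pre_), none here
def pvLoopA : List (List Char) → List Char → Option Int
  | [], _ => none
  | p :: ps, cs =>
    if PySem.Chars.startswith (PySem.Chars.lower cs) p then
      PySem.Int.ofChars? (cs.drop p.length)
    else pvLoopA ps cs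

def extract_variable_index_from_argument_py (raw_argument : String) : Option Int :=
  pvLoopA pvPrefixesA raw_argument.toList

-- ===== PORT B =====
-- the allowed lowercased words before the '#'
def pvWordsB : List (List Char) :=
  [[], "variable".toList, "variable ".toList, "var".toList, "var ".toList]

-- raw_argument.partition('#') = (takeWhile, '#', rest) when a '#' exists
def extract_variable_index_from_argument_py_alt (raw_argument : String) : Option Int :=
  let cs := raw_argument.toList
  let word := cs.takeWhile (fun c => c ≠ '#')
  match cs.dropWhile (fun c => c ≠ '#') with
  | [] => none
  | _ :: rest =>
    if PySem.Chars.lower word ∈ pvWordsB then PySem.Int.ofChars? rest else none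

-- ===== PRECONDITION & SPEC =====
-- Pre_ excludes exactly the inputs where Python A raises ValueError: a matching
-- prefix whose remainder is not an int literal (int(...) fails).
def Pre_extract_variable_index_from_argument_py (raw_argument : String) : Prop :=
  ∀ p ∈ (["#".toList, "variable#".toList, "variable #".toList, "var#".toList, "var #".toList] : List (List Char)),
    PySem.Chars.startswith (PySem.Chars.lower raw_argument.toList) p = true →
    PySem.Int.ofChars? (raw_argument.toList.drop p.length) ≠ none
instance (raw_argument : String) : Decidable (Pre_extract_variable_index_from_argument_py raw_argument) := by unfold Pre_extract_variable_index_from_argument_py; infer_instance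

def pvWitness_extract_variable_index_from_argument_py : String := "Variable #7"

def Spec_extract_variable_index_from_argument_py (raw_argument : String) (out : Option Int) : Prop := out = extract_variable_index_from_argument_py_alt raw_argument
instance (raw_argument : String) (out : Option Int) : Decidable (Spec_extract_variable_index_from_argument_py raw_argument out) := by unfold Spec_extract_variable_index_from_argument_py; infer_instance

-- ===== CLAIM (what is proved, stated in full; the proofs are below) =====
def Claim_equal_extract_variable_index_from_argument_py : Prop := ∀ (raw_argument : String), Dom_extract_variable_index_from_argument_py raw_argument → Pre_extract_variable_index_from_argument_py raw_argument → Spec_extract_variable_index_from_argument_py raw_argument (extract_variable_index_from_argument_py raw_argument)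

-- ===== LEMMAS AND PROOFS =====

-- lowering a non-'#' character never yields '#'
lemma pv_lowerChar_ne_hash {c : Char} (h : c ≠ '#') : PySem.Chars.lowerChar c ≠ '#' := by
  unfold PySem.Chars.lowerChar PySem.Chars.isupper
  split
  · rename_i hu
    simp only [Bool.and_eq_true, decide_eq_true_eq] at hu
    have hlo : ('A').toNat ≤ c.toNat := UInt32.le_iff_toNat_le.mp (Char.le_def.mp hu.1)
    have hhi : c.toNat ≤ ('Z').toNat := UInt32.le_iff_toNat_le.mp (Char.le_def.mp hu.2)
    rw [show ('A').toNat = 65 from rfl] at hlo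
    rw [show ('Z').toNat = 90 from rfl] at hhi
    intro he
    have hv : (c.toNat + 32).isValidChar := by
      left; show c.toNat + 32 < 0xD800; omega
    have ht : (Char.ofNat (c.toNat + 32)).toNat = c.toNat + 32 := by
      rw [Char.toNat_ofNat, if_pos hv]
    rw [he, show ('#').toNat = 35 from rfl] at ht
    omega
  · exact h

-- the crux: a prefix of the shape q ++ "#" matches the lowercased string iff the
-- text before the first '#' lowers to q and a '#' exists at all
lemma pv_startswith_hash_iff (cs q : List Char) (hq : '#' ∉ q) :
    PySem.Chars.startswith (PySem.Chars.lower cs) (q ++ ['#']) = true ↔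
    (PySem.Chars.lower (cs.takeWhile (fun c => c ≠ '#')) = q ∧
     cs.dropWhile (fun c => c ≠ '#') ≠ []) := by
  induction cs generalizing q with
  | nil => simp [PySem.Chars.startswith, PySem.Chars.lower]
  | cons c cs' ih =>
    by_cases hc : c = '#'
    · subst hc
      simp only [List.takeWhile_cons, List.dropWhile_cons]
      norm_num
      cases q with
      | nil => simp [PySem.Chars.startswith, PySem.Chars.lower, List.isPrefixOf]; rfl
      | cons q0 q' =>
        have hq0 : q0 ≠ '#' := fun h => hq (by simp [h])
        simp only [PySem.Chars.startswith, PySem.Chars.lower, List.map_cons, List.cons_append,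
          List.isPrefixOf]
        constructor
        · rintro h
          simp only [Bool.and_eq_true, beq_iff_eq] at h
          exact absurd (h.1.trans (by decide : PySem.Chars.lowerChar '#' = '#')) hq0
        · rintro ⟨h1, h2⟩
          simp at h1
    · simp only [List.takeWhile_cons, List.dropWhile_cons]
      norm_num [hc]
      cases q with
      | nil =>
        simp only [PySem.Chars.startswith, PySem.Chars.lower, List.map_cons, List.nil_append,
          List.isPrefixOf, Bool.and_eq_true, beq_iff_eq]
        constructor
        · intro h
          exact absurd h.1.symm (pv_lowerChar_ne_hash hc)
        · rintro ⟨h1, h2⟩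
          simp at h1
      | cons q0 q' =>
        have hq' : '#' ∉ q' := fun h => hq (by simp [h])
        simp only [PySem.Chars.startswith, PySem.Chars.lower, List.map_cons, List.cons_append,
          List.isPrefixOf, Bool.and_eq_true, beq_iff_eq]
        rw [show (List.isPrefixOf (q' ++ ['#']) (List.map PySem.Chars.lowerChar cs') = true) ↔ _ from ih q' hq']
        simp [PySem.Chars.lower]
        tauto

-- each start-condition of A, as a decision on B's leading word (given a '#' exists)
lemma pv_cond (cs q : List Char) (hq : '#' ∉ q) (hd : cs.dropWhile (fun c => c ≠ '#') ≠ []) :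
    PySem.Chars.startswith (PySem.Chars.lower cs) (q ++ ['#']) =
    decide (PySem.Chars.lower (cs.takeWhile (fun c => c ≠ '#')) = q) := by
  by_cases hw : PySem.Chars.lower (cs.takeWhile (fun c => c ≠ '#')) = q
  · rw [(pv_startswith_hash_iff cs q hq).2 ⟨hw, hd⟩, hw]
    simp
  · rw [decide_eq_false hw]
    exact Bool.eq_false_iff.mpr (fun h => hw (((pv_startswith_hash_iff cs q hq).1 h).1))

-- what A's slice raw[len(prefix):] is, in terms of B's rest
lemma pv_drop_eq_rest (cs rest : List Char)
    (hd : cs.dropWhile (fun c => c ≠ '#') = '#' :: rest) (n : Nat)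
    (hn : n = (cs.takeWhile (fun c => c ≠ '#')).length) :
    cs.drop (n + 1) = rest := by
  conv_lhs => rw [← List.takeWhile_append_dropWhile (p := fun c => decide (c ≠ '#')) (l := cs)]
  rw [hd, hn]
  simp [List.drop_append]


-- the head of a non-empty dropWhile fails the predicate (via List.head?_dropWhile_not)
lemma pv_dropWhile_head {l : List Char} {p : Char → Bool} {b : Char} {l' : List Char}
    (h : l.dropWhile p = b :: l') : p b = false := by
  have := List.head?_dropWhile_not p l
  rw [h] at this
  simpa using this

-- ===== VERDICT (by name: the statement is the Claim_ definition above) =====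
theorem extract_variable_index_from_argument_py_spec : Claim_equal_extract_variable_index_from_argument_py := by
  intro raw _ _
  unfold Spec_extract_variable_index_from_argument_py
  unfold extract_variable_index_from_argument_py extract_variable_index_from_argument_py_alt
  simp only [pvPrefixesA, pvWordsB, pvLoopA]
  cases hd : raw.toList.dropWhile (fun c => c ≠ '#') with
  | nil =>
    have hf : ∀ q : List Char, '#' ∉ q →
        PySem.Chars.startswith (PySem.Chars.lower raw.toList) (q ++ ['#']) = false :=
      fun q hq => Bool.eq_false_iff.mpr
        (fun h => ((pv_startswith_hash_iff raw.toList q hq).1 h).2 hd)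
    have e1 : PySem.Chars.startswith (PySem.Chars.lower raw.toList) ['#'] = false := by
      simpa using hf [] (by decide)
    have e2 : PySem.Chars.startswith (PySem.Chars.lower raw.toList)
        ['v','a','r','i','a','b','l','e','#'] = false := by
      simpa using hf ['v','a','r','i','a','b','l','e'] (by decide)
    have e3 : PySem.Chars.startswith (PySem.Chars.lower raw.toList)
        ['v','a','r','i','a','b','l','e',' ','#'] = false := by
      simpa using hf ['v','a','r','i','a','b','l','e',' '] (by decide)
    have e4 : PySem.Chars.startswith (PySem.Chars.lower raw.toList) ['v','a','r','#'] = false := by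
      simpa using hf ['v','a','r'] (by decide)
    have e5 : PySem.Chars.startswith (PySem.Chars.lower raw.toList) ['v','a','r',' ','#'] = false := by
      simpa using hf ['v','a','r',' '] (by decide)
    simp [e1, e2, e3, e4, e5]
  | cons h0 rest =>
    have hh0 : h0 = '#' := by simpa using pv_dropWhile_head hd
    subst hh0
    have hne : raw.toList.dropWhile (fun c => c ≠ '#') ≠ [] := by rw [hd]; simp
    have c1 : PySem.Chars.startswith (PySem.Chars.lower raw.toList) ['#'] =
        decide (PySem.Chars.lower (raw.toList.takeWhile (fun c => !decide (c = '#'))) = []) := by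
      simpa using pv_cond raw.toList [] (by decide) hne
    have c2 : PySem.Chars.startswith (PySem.Chars.lower raw.toList)
        ['v','a','r','i','a','b','l','e','#'] =
        decide (PySem.Chars.lower (raw.toList.takeWhile (fun c => !decide (c = '#'))) =
          ['v','a','r','i','a','b','l','e']) := by
      simpa using pv_cond raw.toList ['v','a','r','i','a','b','l','e'] (by decide) hne
    have c3 : PySem.Chars.startswith (PySem.Chars.lower raw.toList)
        ['v','a','r','i','a','b','l','e',' ','#'] =
        decide (PySem.Chars.lower (raw.toList.takeWhile (fun c => !decide (c = '#'))) =
          ['v','a','r','i','a','b','l','e',' ']) := by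
      simpa using pv_cond raw.toList ['v','a','r','i','a','b','l','e',' '] (by decide) hne
    have c4 : PySem.Chars.startswith (PySem.Chars.lower raw.toList) ['v','a','r','#'] =
        decide (PySem.Chars.lower (raw.toList.takeWhile (fun c => !decide (c = '#'))) =
          ['v','a','r']) := by
      simpa using pv_cond raw.toList ['v','a','r'] (by decide) hne
    have c5 : PySem.Chars.startswith (PySem.Chars.lower raw.toList) ['v','a','r',' ','#'] =
        decide (PySem.Chars.lower (raw.toList.takeWhile (fun c => !decide (c = '#'))) =
          ['v','a','r',' ']) := by
      simpa using pv_cond raw.toList ['v','a','r',' '] (by decide) hne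
    have hdropn : ∀ n : Nat,
        (raw.toList.takeWhile (fun c => !decide (c = '#'))).length = n →
        raw.toList.drop (n + 1) = rest := by
      intro n hn
      exact pv_drop_eq_rest raw.toList rest hd n (by simpa using hn.symm)
    by_cases h1 : PySem.Chars.lower (raw.toList.takeWhile (fun c => !decide (c = '#'))) = []
    · have hlen : (raw.toList.takeWhile (fun c => !decide (c = '#'))).length = 0 := by
        simpa [PySem.Chars.lower] using congrArg List.length h1
      have hdrop := hdropn 0 hlen
      simp [c1, h1, hdrop]
    · by_cases h2 : PySem.Chars.lower (raw.toList.takeWhile (fun c => !decide (c = '#'))) =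
          ['v','a','r','i','a','b','l','e']
      · have hlen : (raw.toList.takeWhile (fun c => !decide (c = '#'))).length = 8 := by
          simpa [PySem.Chars.lower] using congrArg List.length h2
        have hdrop := hdropn 8 hlen
        simp [c1, c2, h2, hdrop]
      · by_cases h3 : PySem.Chars.lower (raw.toList.takeWhile (fun c => !decide (c = '#'))) =
            ['v','a','r','i','a','b','l','e',' ']
        · have hlen : (raw.toList.takeWhile (fun c => !decide (c = '#'))).length = 9 := by
            simpa [PySem.Chars.lower] using congrArg List.length h3
          have hdrop := hdropn 9 hlen
          simp [c1, c2, c3, h3, hdrop]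
        · by_cases h4 : PySem.Chars.lower (raw.toList.takeWhile (fun c => !decide (c = '#'))) =
              ['v','a','r']
          · have hlen : (raw.toList.takeWhile (fun c => !decide (c = '#'))).length = 3 := by
              simpa [PySem.Chars.lower] using congrArg List.length h4
            have hdrop := hdropn 3 hlen
            simp [c1, c2, c3, c4, h4, hdrop]
          · by_cases h5 : PySem.Chars.lower (raw.toList.takeWhile (fun c => !decide (c = '#'))) =
                ['v','a','r',' ']
            · have hlen : (raw.toList.takeWhile (fun c => !decide (c = '#'))).length = 4 := by
                simpa [PySem.Chars.lower] using congrArg List.length h5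
              have hdrop := hdropn 4 hlen
              simp [c1, c2, c3, c4, c5, h5, hdrop]
            · simp [c1, c2, c3, c4, c5, h1, h2, h3, h4, h5]
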